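-- pv_equiv track=rewrite | github.com/LamarckLab/022_PythonTip_Exercises | 112.py | is_sorted_rotated
-- ===== SOURCE A (Python) =====
-- def is_sorted_rotated(input_list):
--     # 此处写你的代码
--     sorted_list = sorted(input_list)
--     if input_list == sorted_list:
--         return False
--     for i in range(0,len(input_list)):
--         input_list = input_list[1:] + [input_list[0]]
--         if input_list == sorted_list:
--             return True
--     return False
-- ===== SOURCE B (Python) =====
-- def is_sorted_rotated(input_list):
--     if not input_list:
--         return False
--     descents = sum(1 for x, y in zip(input_list, input_list[1:]) if x > y)
--     return descents == 1 and input_list[-1] <= input_list[0]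
-- ===== Notes on version B (the rewrite author's own statement) =====
-- stated objective: faster
-- what changed: Instead of materializing every rotation and comparing each against a sorted copy, B makes a single pass counting adjacent descents: the list is a non-trivial rotation of its sorted version iff it has exactly one descent and its last element is <= its first.
import Mathlib
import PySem

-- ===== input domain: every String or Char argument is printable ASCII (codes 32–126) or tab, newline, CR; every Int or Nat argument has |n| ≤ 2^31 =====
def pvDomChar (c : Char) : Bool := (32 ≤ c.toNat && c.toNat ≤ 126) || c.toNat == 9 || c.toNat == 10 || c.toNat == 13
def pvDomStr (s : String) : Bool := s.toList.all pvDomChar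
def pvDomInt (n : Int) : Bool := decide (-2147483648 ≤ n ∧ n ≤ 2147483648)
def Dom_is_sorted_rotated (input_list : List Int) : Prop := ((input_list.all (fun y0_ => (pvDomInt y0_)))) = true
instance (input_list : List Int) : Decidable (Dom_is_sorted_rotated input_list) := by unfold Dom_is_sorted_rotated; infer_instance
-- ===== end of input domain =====

-- B replaces A's generate-all-rotations scan (quadratic) by a single linear pass counting
-- adjacent descents: exactly one descent and last element ≤ first element.

-- ===== PORT A =====
-- input_list[1:] + [input_list[0]]; the none branch of pyGet? is unreachable (the loop body
-- only runs on nonempty lists, where index 0 is in range).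
def pyRotOnce (xs : List Int) : List Int :=
  PySem.List.slice xs (some 1) none ++
    (match PySem.List.pyGet? xs 0 with
     | some h => [h]
     | none => [])

def isrLoop : Nat → List Int → List Int → Bool
  | 0, _, _ => false
  | k + 1, cur, sorted_list =>
    let cur' := pyRotOnce cur
    if cur' = sorted_list then true else isrLoop k cur' sorted_list

def is_sorted_rotated (input_list : List Int) : Bool :=
  let sorted_list := PySem.List.sorted input_list (fun x => x) false
  if input_list = sorted_list then false
  else isrLoop input_list.length input_list sorted_list

def is_sorted_rotated_alt (input_list : List Int) : Bool :=
  match input_list with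
  | [] => false
  | h :: _ =>
    let descents : Int :=
      ((input_list.zip (PySem.List.slice input_list (some 1) none)).map
        (fun p => if p.2 < p.1 then (1 : Int) else 0)).sum
    decide (descents = 1) && decide (PySem.List.pyGetD input_list (-1) 0 ≤ h)

-- ===== PRECONDITION & SPEC =====
def Spec_is_sorted_rotated (input_list : List Int) (out : Bool) : Prop := out = is_sorted_rotated_alt input_list
instance (input_list : List Int) (out : Bool) : Decidable (Spec_is_sorted_rotated input_list out) := by unfold Spec_is_sorted_rotated; infer_instance

-- ===== CLAIM (what is proved, stated in full; the proofs are below) =====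
def Claim_equal_is_sorted_rotated : Prop := ∀ (input_list : List Int), Dom_is_sorted_rotated input_list → Spec_is_sorted_rotated input_list (is_sorted_rotated input_list)

-- ===== LEMMAS AND PROOFS =====
def desc : List Int → Nat
  | a :: b :: t => (if b < a then 1 else 0) + desc (b :: t)
  | _ => 0

def rot : List Int → List Int
  | [] => []
  | h :: t => t ++ [h]

def rotN (k : Nat) (l : List Int) : List Int := rot^[k] l

def cyc (l : List Int) : Nat := desc (l ++ l.take 1)

lemma pyRotOnce_eq (l : List Int) : pyRotOnce l = rot l := by
  cases l with
  | nil => rfl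
  | cons h t =>
    have hs : PySem.List.slice (h :: t) (some 1) none = t := by
      have := PySem.List.slice_from_natCast (xs := h :: t) (a := 1); simpa using this
    simp [pyRotOnce, rot, hs, PySem.List.pyGet?, PySem.List.pyIdx?]

lemma rotN_succ (k : Nat) (l : List Int) : rotN (k + 1) l = rotN k (rot l) :=
  Function.iterate_succ_apply rot k l

lemma rotN_succ' (k : Nat) (l : List Int) : rotN (k + 1) l = rot (rotN k l) :=
  Function.iterate_succ_apply' rot k l

lemma rot_perm (l : List Int) : (rot l).Perm l := by
  cases l with
  | nil => exact List.Perm.refl _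
  | cons h t => exact List.perm_append_singleton h t

lemma rotN_perm (k : Nat) (l : List Int) : (rotN k l).Perm l := by
  induction k with
  | zero => exact List.Perm.refl _
  | succ k ih => exact ((rotN_succ' k l ▸ rot_perm (rotN k l)).trans ih)

lemma rotN_eq_drop_take (k : Nat) (l : List Int) (hk : k ≤ l.length) :
    rotN k l = l.drop k ++ l.take k := by
  induction k with
  | zero => simp [rotN]
  | succ k ih =>
    have hk' : k < l.length := by omega
    have hd : l.drop k = l[k] :: l.drop (k + 1) := List.drop_eq_getElem_cons hk'
    have ht : l.take k ++ [l[k]] = l.take (k + 1) := by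
      have := List.take_concat_get hk'; simp only [List.concat_eq_append] at this; exact this
    rw [rotN_succ', ih (by omega), ← ht, hd]
    simp only [List.cons_append, rot, List.append_assoc]

lemma rotN_one (l : List Int) : rotN 1 l = rot l := by simp [rotN]

lemma isrLoop_iff (m : Nat) (cur S : List Int) :
    isrLoop m cur S = true ↔ ∃ k, 1 ≤ k ∧ k ≤ m ∧ rotN k cur = S := by
  induction m generalizing cur with
  | zero =>
    simp only [isrLoop]
    constructor
    · intro h; cases h
    · rintro ⟨k, h1, h2, _⟩; omega
  | succ m ih =>
    simp only [isrLoop, pyRotOnce_eq]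
    by_cases h : rot cur = S
    · rw [h, if_pos rfl]
      constructor
      · intro _; exact ⟨1, le_refl _, by omega, by rw [rotN_one]; exact h⟩
      · intro _; rfl
    · rw [if_neg h, ih]
      constructor
      · rintro ⟨k, h1, h2, h3⟩
        exact ⟨k + 1, by omega, by omega, by rw [rotN_succ]; exact h3⟩
      · rintro ⟨k, h1, h2, h3⟩
        match k, h1 with
        | 1, _ => exact absurd (by rw [← rotN_one cur]; exact h3) h
        | k + 2, _ =>
          exact ⟨k + 1, by omega, by omega, by rw [← rotN_succ]; exact h3⟩

lemma desc_append_cons (u : List Int) (a : Int) (ys : List Int) :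
    desc (u ++ a :: ys) = desc (u ++ [a]) + desc (a :: ys) := by
  induction u with
  | nil => simp [desc]
  | cons x u' ih =>
    cases u' with
    | nil => cases ys with
      | nil => simp [desc]
      | cons b v => simp only [List.cons_append, List.nil_append, desc]; omega
    | cons y u'' =>
      simp only [List.cons_append, desc] at ih ⊢
      omega

lemma desc_append_singleton (u : List Int) (y z : Int) (hz : u.getLast? = some z) :
    desc (u ++ [y]) = desc u + (if y < z then 1 else 0) := by
  induction u with
  | nil => simp at hz
  | cons x u' ih =>
    cases u' with
    | nil => simp at hz; subst hz; simp [desc]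
    | cons b v =>
      have hz' : (b :: v).getLast? = some z := by
        rw [← hz, List.getLast?_cons_cons]
      have := ih hz'
      simp only [List.cons_append, desc] at this ⊢
      omega

lemma desc_eq_zero_iff_pairwise (l : List Int) : desc l = 0 ↔ l.Pairwise (· ≤ ·) := by
  induction l with
  | nil => simp [desc]
  | cons a t ih =>
    cases t with
    | nil => simp [desc]
    | cons b v =>
      rw [List.pairwise_cons]
      constructor
      · intro h
        have h1 : ¬ b < a := by by_contra hb; simp [desc, hb] at h
        have h2 : desc (b :: v) = 0 := by simp [desc] at h; omega
        have hp := ih.mp h2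
        refine ⟨fun x hx => ?_, hp⟩
        rcases List.mem_cons.mp hx with hx | hx
        · omega
        · have hb := (List.pairwise_cons.mp hp).1 x hx
          omega
      · rintro ⟨hall, hp⟩
        have h1 : ¬ b < a := by have := hall b (by simp); omega
        have h2 := ih.mpr hp
        simp [desc, h1, h2]

lemma cyc_rot (l : List Int) : cyc (rot l) = cyc l := by
  cases l with
  | nil => rfl
  | cons h t =>
    cases t with
    | nil => rfl
    | cons b t' =>
      show desc ((b :: t' ++ [h]) ++ (b :: t' ++ [h]).take 1) = desc ((h :: b :: t') ++ [h])
      have lhs : (b :: t' ++ [h]) ++ (b :: t' ++ [h]).take 1 = (b :: t') ++ (h :: [b]) := by simp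
      have : desc ((b :: t') ++ h :: [b]) = desc ((b :: t') ++ [h]) + desc (h :: [b]) :=
        desc_append_cons (b :: t') h [b]
      rw [lhs, this]
      simp only [List.cons_append, desc]
      omega

lemma cyc_rotN (k : Nat) (l : List Int) : cyc (rotN k l) = cyc l := by
  induction k with
  | zero => rfl
  | succ k ih => rw [rotN_succ', cyc_rot, ih]

lemma cyc_cons_eq (h : Int) (t : List Int) :
    cyc (h :: t) = desc (h :: t) + (if h < (h :: t).getLast (by simp) then 1 else 0) := by
  have hz : (h :: t).getLast? = some ((h :: t).getLast (by simp)) := List.getLast?_eq_some_getLast _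
  show desc ((h :: t) ++ [h]) = _
  rw [desc_append_singleton (h :: t) h _ hz]

lemma first_descent (l : List Int) (hd : 1 ≤ desc l) :
    ∃ u a b v, l = u ++ a :: b :: v ∧ b < a ∧ desc (u ++ [a]) = 0 := by
  induction l with
  | nil => simp [desc] at hd
  | cons x t ih =>
    cases t with
    | nil => simp [desc] at hd
    | cons y v =>
      by_cases hxy : y < x
      · exact ⟨[], x, y, v, by simp, hxy, by simp [desc]⟩
      · have hd' : 1 ≤ desc (y :: v) := by simp [desc, hxy] at hd; omega
        obtain ⟨u, a, b, w, heq, hba, hu0⟩ := ih hd'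
        refine ⟨x :: u, a, b, w, by simp [heq], hba, ?_⟩
        cases u with
        | nil =>
          have ha : y = a := by simpa using congrArg (fun s => s.headD 0) heq
          subst ha
          simp [desc, hxy]
        | cons c u' =>
          have hc : y = c := by simpa using congrArg (fun s => s.headD 0) heq
          subst hc
          simp only [List.cons_append, desc] at hu0 ⊢
          simp [hxy, hu0]

lemma sum_zip_eq_desc (l : List Int) :
    ((l.zip (l.drop 1)).map (fun p => if p.2 < p.1 then (1 : Int) else 0)).sum = (desc l : Int) := by
  induction l with
  | nil => simp [desc]
  | cons a t ih =>
    cases t with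
    | nil => simp [desc]
    | cons b v =>
      simp only [List.drop_succ_cons, List.drop_zero, List.zip_cons_cons, List.map_cons,
        List.sum_cons, desc] at ih ⊢
      rw [ih]
      push_cast
      by_cases hba : b < a <;> simp [hba]

lemma alt_iff (h : Int) (t : List Int) :
    is_sorted_rotated_alt (h :: t) = true ↔
      desc (h :: t) = 1 ∧ (h :: t).getLast (by simp) ≤ h := by
  have hs : PySem.List.slice (h :: t) (some 1) none = t := by
    have := PySem.List.slice_from_natCast (xs := h :: t) (a := 1); simpa using this
  have hlast : PySem.List.pyGetD (h :: t) (-1) 0 = (h :: t).getLast (by simp) :=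
    PySem.List.pyGetD_neg_one (h :: t) 0 (by simp)
  have hsum := sum_zip_eq_desc (h :: t)
  simp only [List.drop_succ_cons, List.drop_zero] at hsum
  simp only [is_sorted_rotated_alt, hs, hsum, hlast, Bool.and_eq_true, decide_eq_true_eq]
  constructor
  · rintro ⟨h1, h2⟩; exact ⟨by exact_mod_cast h1, h2⟩
  · rintro ⟨h1, h2⟩; exact ⟨by exact_mod_cast h1, h2⟩

lemma main_thm (l : List Int) : is_sorted_rotated l = is_sorted_rotated_alt l := by
  cases l with
  | nil => rfl
  | cons h t =>
    have SP : (PySem.List.sorted (h :: t) (fun x => x) false).Pairwise (· ≤ ·) := by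
      have := PySem.List.sorted_pairwise (h :: t) (fun x : Int => x); simpa using this
    have Sperm : (PySem.List.sorted (h :: t) (fun x => x) false).Perm (h :: t) :=
      PySem.List.sorted_perm (h :: t) _ false
    have descS : desc (PySem.List.sorted (h :: t) (fun x => x) false) = 0 :=
      (desc_eq_zero_iff_pairwise _).mpr SP
    rw [Bool.eq_iff_iff, alt_iff]
    simp only [is_sorted_rotated]
    by_cases hls : (h :: t) = PySem.List.sorted (h :: t) (fun x => x) false
    · rw [if_pos hls]
      simp only [Bool.false_eq_true, false_iff, not_and]
      intro hd
      rw [← hls] at descS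
      omega
    · rw [if_neg hls, isrLoop_iff]
      constructor
      · rintro ⟨k, hk1, hk2, hrot⟩
        have hcyc : cyc (h :: t) = cyc (PySem.List.sorted (h :: t) (fun x => x) false) := by
          rw [← hrot, cyc_rotN]
        have hcycS : cyc (PySem.List.sorted (h :: t) (fun x => x) false) ≤ 1 := by
          cases hSc : PySem.List.sorted (h :: t) (fun x => x) false with
          | nil =>
            have hlen := Sperm.length_eq
            rw [hSc] at hlen; simp at hlen
          | cons s0 sT =>
            rw [hSc] at descS
            rw [cyc_cons_eq]
            split_ifs <;> omega
        have hdl : 1 ≤ desc (h :: t) := by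
          rcases Nat.eq_zero_or_pos (desc (h :: t)) with h0 | h1
          · exfalso
            have hp := (desc_eq_zero_iff_pairwise (h :: t)).mp h0
            exact hls ((PySem.List.sorted_eq_self_of_pairwise (h :: t) (fun x => x)
              (by simpa using hp)).symm)
          · exact h1
        rw [cyc_cons_eq] at hcyc
        constructor
        · split_ifs at hcyc <;> omega
        · by_contra hlt
          simp only [not_le] at hlt
          rw [if_pos hlt] at hcyc
          omega
      · rintro ⟨hd1, hlast⟩
        have hcyc : cyc (h :: t) = 1 := by
          rw [cyc_cons_eq, hd1, if_neg (by omega)]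
        obtain ⟨u, a, b, v, heq, hba, hu0⟩ := first_descent (h :: t) (by omega)
        refine ⟨u.length + 1, by omega, ?_, ?_⟩
        · rw [heq]; simp
        · have hsplit : (h :: t) = (u ++ [a]) ++ (b :: v) := by rw [heq]; simp
          have hrot : rotN (u.length + 1) (h :: t) = (b :: v) ++ (u ++ [a]) := by
            rw [rotN_eq_drop_take _ _ (by rw [heq]; simp)]
            conv_lhs => rw [hsplit]
            rw [show u.length + 1 = (u ++ [a]).length by simp,
              List.drop_left, List.take_left]
          obtain ⟨rest, hur⟩ : ∃ rest, u ++ [a] = h :: rest := by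
            cases u with
            | nil =>
              have : a = h := by simpa using congrArg (fun s => s.headD 0) heq.symm
              exact ⟨[], by simp [this]⟩
            | cons c u' =>
              have : c = h := by simpa using congrArg (fun s => s.headD 0) heq.symm
              exact ⟨u' ++ [a], by simp [this]⟩
          have hX : desc (b :: (v ++ [h])) = 0 := by
            have e1 : (h :: t) ++ (h :: t).take 1 = u ++ a :: (b :: (v ++ [h])) := by
              show (h :: t) ++ [h] = _
              conv_lhs => rw [heq]
              simp
            have e2 : cyc (h :: t)
                = desc (u ++ [a]) + ((if b < a then 1 else 0) + desc (b :: (v ++ [h]))) := by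
              rw [cyc, e1, desc_append_cons, desc]
            rw [hcyc, hu0, if_pos hba] at e2
            omega
          have hdrot : desc (rotN (u.length + 1) (h :: t)) = 0 := by
            rw [hrot, hur]
            have e2 := desc_append_cons (b :: v) h rest
            simp only [List.cons_append] at e2 ⊢
            rw [e2, hX, ← hur, hu0]
          have hp := (desc_eq_zero_iff_pairwise _).mp hdrot
          exact (PySem.List.sorted_id_eq_of_perm_of_pairwise (h :: t) _
            (rotN_perm _ (h :: t)) hp).symm

-- ===== VERDICT (by name: the statement is the Claim_ definition above) =====
theorem is_sorted_rotated_spec : Claim_equal_is_sorted_rotated := by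
  intro input_list _
  unfold Spec_is_sorted_rotated
  exact main_thm input_list
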